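-- pv_equiv track=rewrite | github.com/peejh/coding-practice | HackerRank/ProjectEuler+/10_summationOfPrimes.py | primeSums
-- ===== SOURCE A (Python) =====
-- def primeSums(n):
--     '''
--     Uses Sieve of Eratosthenes to find all primes up to a
--     given `n`.
--     Returns a list of cumulative sum of primes up to a
--     given index.
--     '''
--     MAX_N = n + 1
--     sieve = [True for _ in range(MAX_N)]
--     sieve[0], sieve[1] = False, False
--     for i in range(2, MAX_N):
--         if sieve[i]:
--             for j in range(i*2, MAX_N, i):
--                 sieve[j] = False
--
--     cumulative_sums = [0]
--     prev = 0
--     for i in range(1, MAX_N):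
--         if sieve[i]:
--             prev += i
--         cumulative_sums.append(prev)
--
--     return cumulative_sums
-- ===== SOURCE B (Python) =====
-- def primeSums(n):
--     sums = [0]
--     prev = 0
--     primes = []
--     for i in range(1, n + 1):
--         is_p = i >= 2
--         for p in primes:
--             if p * p > i:
--                 break
--             if i % p == 0:
--                 is_p = False
--                 break
--         if is_p:
--             primes.append(i)
--             prev += i
--         sums.append(prev)
--     return sums
-- ===== Notes on version B (the rewrite author's own statement) =====
-- stated objective: simpler
-- what changed: Replaces the Sieve of Eratosthenes boolean array with its nested multiple-marking loops by an independent primality test per number (trial division by the primes collected so far) feeding a single accumulator pass.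
-- crash fix: For n <= 0 A raises IndexError (the initial sieve assignments index a too-short list); B returns [0]. — e.g. on primeSums(0): A raises IndexError, B returns [0]
import Mathlib
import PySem

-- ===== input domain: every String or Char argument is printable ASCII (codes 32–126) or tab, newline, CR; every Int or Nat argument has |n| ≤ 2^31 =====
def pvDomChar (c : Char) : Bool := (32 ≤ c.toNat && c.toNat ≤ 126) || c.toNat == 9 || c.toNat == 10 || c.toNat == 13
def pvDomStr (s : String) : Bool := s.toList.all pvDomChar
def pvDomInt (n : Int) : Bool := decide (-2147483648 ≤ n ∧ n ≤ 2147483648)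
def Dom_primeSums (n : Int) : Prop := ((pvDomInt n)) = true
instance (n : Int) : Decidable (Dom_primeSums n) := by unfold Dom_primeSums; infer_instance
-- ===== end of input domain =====

-- B replaces the Sieve of Eratosthenes boolean array (nested multiple-marking loops) by an
-- independent trial-division primality test per number feeding a single accumulator pass
-- (objective: simpler; not faster).


-- ===== PORT A =====
-- Literal transliteration of A: build the sieve list, cross off multiples, then the
-- cumulative-sum pass.  pySetD/pyGetD are exact on Pre_ (indices in range there).
def primeSums (n : Int) : List Int :=
  let MAXN : Int := n + 1
  let sieve : List Bool := (PySem.List.pyRange 0 MAXN 1).map (fun _ => true)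
  let sieve := PySem.List.pySetD (PySem.List.pySetD sieve 0 false) 1 false
  let sieve := (PySem.List.pyRange 2 MAXN 1).foldl
    (fun sv i =>
      if PySem.List.pyGetD sv i false then
        (PySem.List.pyRange (i * 2) MAXN i).foldl (fun sv2 j => PySem.List.pySetD sv2 j false) sv
      else sv) sieve
  let res := (PySem.List.pyRange 1 MAXN 1).foldl
    (fun (st : List Int × Int) i =>
      let prev := if PySem.List.pyGetD sieve i false then st.2 + i else st.2
      (st.1 ++ [prev], prev))
    ([0], 0)
  res.1

-- ===== PORT B =====
-- for p in primes: if p * p > i: break; if i % p == 0: is_p = False; break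
def pvCheck (i : Int) : List Int → Bool
  | [] => true
  | p :: ps =>
    if i < p * p then true
    else if PySem.Int.mod i p = 0 then false
    else pvCheck i ps

def primeSums_alt (n : Int) : List Int :=
  (((PySem.List.pyRange 1 (n + 1) 1).foldl
      (fun (st : (List Int × Int) × List Int) i =>
        let isp := decide (2 ≤ i) && pvCheck i st.2
        let primes := if isp then st.2 ++ [i] else st.2
        let prev := if isp then st.1.2 + i else st.1.2
        ((st.1.1 ++ [prev], prev), primes))
      (([0], 0), [])).1).1

-- ===== PRECONDITION & SPEC =====
-- Pre_: exactly the inputs on which A returns (for n ≤ 0 the initial sieve assignments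
-- index a too-short list and raise IndexError).
def Pre_primeSums (n : Int) : Prop := 1 ≤ n
instance (n : Int) : Decidable (Pre_primeSums n) := by unfold Pre_primeSums; infer_instance
def pvWitness_primeSums : Int := 5

-- For n ≤ 0 A raises IndexError (the initial sieve assignments index a too-short list); B returns [0].
def Raises_primeSums (n : Int) : Prop := n ≤ 0
instance (n : Int) : Decidable (Raises_primeSums n) := by unfold Raises_primeSums; infer_instance
def pvRaiseWitness_primeSums : Int := 0
def pvRaiseWitnessOut_primeSums : List Int := [0]

def Spec_primeSums (n : Int) (out : List Int) : Prop := out = primeSums_alt n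
instance (n : Int) (out : List Int) : Decidable (Spec_primeSums n out) := by unfold Spec_primeSums; infer_instance

-- ===== CLAIM (what is proved, stated in full; the proofs are below) =====
def Claim_equal_primeSums : Prop := ∀ (n : Int), Dom_primeSums n → Pre_primeSums n → Spec_primeSums n (primeSums n)
def Claim_raises_primeSums : Prop := (∀ (n : Int), Dom_primeSums n → Raises_primeSums n → ¬ Pre_primeSums n) ∧ (Dom_primeSums (pvRaiseWitness_primeSums) ∧ Raises_primeSums (pvRaiseWitness_primeSums) ∧ primeSums_alt (pvRaiseWitness_primeSums) = pvRaiseWitnessOut_primeSums)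

-- ===== LEMMAS AND PROOFS =====

-- sieve states as a function over indices
def pvS (N : Nat) (f : Int → Bool) : List Bool := (List.range N).map (fun k : Nat => f (k : Int))

-- sieve value A's algorithm maintains after processing i = 2 .. k-1:
-- x survives iff 2 ≤ x and no d in [2, k) with d ∣ x and 2*d ≤ x has crossed it off
def pvF (k : Int) (x : Int) : Bool :=
  decide (2 ≤ x ∧ ∀ d ∈ PySem.List.pyRange 2 k 1, ¬(d ∣ x ∧ 2 * d ≤ x))

lemma pvS_congr {N : Nat} {f g : Int → Bool}
    (h : ∀ x : Int, 0 ≤ x → x < (N : Int) → f x = g x) : pvS N f = pvS N g := by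
  unfold pvS
  apply List.map_congr_left
  intro k hk
  exact h k (Int.natCast_nonneg k) (by exact_mod_cast List.mem_range.mp hk)

lemma pvS_get {N : Nat} {f : Int → Bool} {i : Int} (h0 : 0 ≤ i) (h1 : i < (N : Int)) :
    PySem.List.pyGetD (pvS N f) i false = f i := by
  rw [show i = ((i.toNat : Nat) : Int) by omega, PySem.List.pyGetD_natCast]
  have : i.toNat < N := by omega
  simp [pvS, this]

lemma pvS_set {N : Nat} {f : Int → Bool} {j : Int} {v : Bool} (h0 : 0 ≤ j) :
    PySem.List.pySetD (pvS N f) j v = pvS N (fun x => if x = j then v else f x) := by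
  rw [PySem.List.pySetD_of_nonneg _ _ h0]
  apply List.ext_getElem
  · simp [pvS]
  · intro k hk1 hk2
    simp only [pvS, List.length_map, List.length_range] at hk2
    simp [List.getElem_set, pvS]
    rcases eq_or_ne k j.toNat with h | h
    · simp [h, show ((j.toNat : Nat) : Int) = j by omega]
    · simp [show ¬((k : Int) = j) by omega]
      intro he; exact absurd he.symm h

lemma pvS_mark {N : Nat} {f : Int → Bool} (js : List Int) (h : ∀ j ∈ js, 0 ≤ j) :
    js.foldl (fun sv j => PySem.List.pySetD sv j false) (pvS N f)
      = pvS N (fun x => if x ∈ js then false else f x) := by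
  induction js generalizing f with
  | nil => simp
  | cons j rest ih =>
    simp only [List.foldl_cons]
    rw [pvS_set (h j (by simp))]
    rw [ih (fun x hx => h x (by simp [hx]))]
    congr 1
    funext x
    by_cases hx : x ∈ rest <;> by_cases hxj : x = j <;> simp [hx, hxj]

lemma pvOuter (N : Nat) (b : Int) (hb : b = (N : Int)) (m : Nat) :
    ∀ (k : Int), 2 ≤ k → b = k + m →
    (PySem.List.pyRange k b 1).foldl
      (fun sv i =>
        if PySem.List.pyGetD sv i false then
          (PySem.List.pyRange (i * 2) b i).foldl (fun sv2 j => PySem.List.pySetD sv2 j false) sv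
        else sv) (pvS N (pvF k))
      = pvS N (pvF b) := by
  induction m with
  | zero =>
    intro k hk hkb
    rw [PySem.List.pyRange_one_eq_nil (by omega), List.foldl_nil, show k = b by omega]
  | succ m ih =>
    intro k hk hkb
    have hkb' : k < b := by omega
    rw [PySem.List.pyRange_one_cons hkb', List.foldl_cons]
    have hstep : (if PySem.List.pyGetD (pvS N (pvF k)) k false then
        (PySem.List.pyRange (k * 2) b k).foldl (fun sv2 j => PySem.List.pySetD sv2 j false)
          (pvS N (pvF k))
      else pvS N (pvF k)) = pvS N (pvF (k + 1)) := by
      rw [pvS_get (by omega) (by omega)]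
      have hk0 : (0 : Int) < k := by omega
      by_cases hkk : pvF k k = true
      · rw [if_pos hkk]
        rw [pvS_mark _ (fun j hj => by
          rw [PySem.List.mem_pyRange_iff_of_pos hk0] at hj
          omega)]
        apply pvS_congr
        intro x hx0 hxN
        by_cases hxj : x ∈ PySem.List.pyRange (k * 2) b k
        · rw [if_pos hxj]
          rw [PySem.List.mem_pyRange_iff_of_pos hk0] at hxj
          obtain ⟨h2k, hxb, hdvd'⟩ := hxj
          have hdvdx : k ∣ x := by
            have := dvd_add hdvd' (⟨2, rfl⟩ : k ∣ k * 2)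
            simpa using this
          symm
          apply decide_eq_false
          rintro ⟨-, hall⟩
          exact hall k (by rw [PySem.List.mem_pyRange_one]; omega) ⟨hdvdx, by omega⟩
        · rw [if_neg hxj]
          unfold pvF
          rw [decide_eq_decide]
          apply and_congr_right
          intro hx2
          constructor
          · intro hall d hd
            rw [PySem.List.mem_pyRange_one] at hd
            rintro ⟨hdvdx, h2dx⟩
            rcases (by omega : d < k ∨ d = k) with hdk | hdk
            · exact hall d (by rw [PySem.List.mem_pyRange_one]; omega) ⟨hdvdx, h2dx⟩
            · rw [hdk] at hdvdx h2dx
              apply hxj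
              rw [PySem.List.mem_pyRange_iff_of_pos hk0]
              exact ⟨by omega, by omega, dvd_sub hdvdx ⟨2, rfl⟩⟩
          · intro hall d hd
            rw [PySem.List.mem_pyRange_one] at hd
            exact hall d (by rw [PySem.List.mem_pyRange_one]; omega)
      · rw [if_neg hkk]
        rw [Bool.not_eq_true] at hkk
        unfold pvF at hkk
        rw [decide_eq_false_iff_not] at hkk
        have hex : ∃ d, d ∈ PySem.List.pyRange 2 k 1 ∧ d ∣ k ∧ 2 * d ≤ k := by
          by_contra hno
          push Not at hno
          exact hkk ⟨by omega, fun d hd hdk => absurd hdk.2 (by have := hno d hd hdk.1; omega)⟩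
        obtain ⟨d0, hd0m, hd0k, h2d0⟩ := hex
        rw [PySem.List.mem_pyRange_one] at hd0m
        congr 1
        funext x
        unfold pvF
        rw [decide_eq_decide]
        apply and_congr_right
        intro hx2
        constructor
        · intro hall d hd
          rw [PySem.List.mem_pyRange_one] at hd
          rintro ⟨hdvdx, h2dx⟩
          rcases (by omega : d < k ∨ d = k) with hdk | hdk
          · exact hall d (by rw [PySem.List.mem_pyRange_one]; omega) ⟨hdvdx, h2dx⟩
          · rw [hdk] at hdvdx h2dx
            exact hall d0 (by rw [PySem.List.mem_pyRange_one]; omega)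
              ⟨hd0k.trans hdvdx, by omega⟩
        · intro hall d hd
          rw [PySem.List.mem_pyRange_one] at hd
          exact hall d (by rw [PySem.List.mem_pyRange_one]; omega)
    rw [hstep]
    exact ih (k + 1) (by omega) (by omega)

-- B-side: Bool test "x has no divisor d with 2 ≤ d and d*d ≤ x"
def pvPB (x : Int) : Bool :=
  decide (2 ≤ x ∧ ∀ e ∈ PySem.List.pyRange 2 x 1, ¬(e ∣ x ∧ e * e ≤ x))

-- the primes B has collected after processing 1 .. k
def pvPrimes (k : Int) : List Int :=
  (PySem.List.pyRange 2 (k + 1) 1).filter (fun x => pvPB x)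

def pvStepPB : (List Int × Int) → Int → (List Int × Int) :=
  fun st i =>
    let prev := if pvPB i then st.2 + i else st.2
    (st.1 ++ [prev], prev)

lemma pvF_eq_pvPB (b i : Int) (_h1 : 1 ≤ i) (hib : i < b) : pvF b i = pvPB i := by
  unfold pvF pvPB
  rw [decide_eq_decide]
  apply and_congr_right
  intro hi2
  constructor
  · intro hall e he
    rw [PySem.List.mem_pyRange_one] at he
    rintro ⟨hei, hee⟩
    exact hall e (by rw [PySem.List.mem_pyRange_one]; omega) ⟨hei, by nlinarith⟩
  · intro hall d hd
    rw [PySem.List.mem_pyRange_one] at hd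
    rintro ⟨hdvd, h2d⟩
    obtain ⟨c, hc⟩ := hdvd
    have hd0 : 0 < d := by omega
    have hc2 : 2 ≤ c := by nlinarith
    have he2 : (2 : Int) ≤ min d c := le_min hd.1 hc2
    have hee : min d c * min d c ≤ i :=
      calc min d c * min d c ≤ d * c :=
            mul_le_mul (min_le_left d c) (min_le_right d c) (by omega) (by omega)
        _ = i := hc.symm
    have hei : min d c ∣ i := by
      rcases min_cases d c with ⟨hm, _⟩ | ⟨hm, _⟩
      · rw [hm]; exact ⟨c, hc⟩
      · rw [hm]; exact ⟨d, by linarith [hc]⟩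
    have hlt : min d c < i := by nlinarith
    exact hall (min d c) (by rw [PySem.List.mem_pyRange_one]; omega) ⟨hei, hee⟩

lemma pvCheck_eq (i : Int) : ∀ (L : List Int), L.Pairwise (· < ·) → (∀ p ∈ L, 2 ≤ p) →
    (pvCheck i L = true ↔ ∀ p ∈ L, p * p ≤ i → ¬ p ∣ i) := by
  intro L
  induction L with
  | nil => simp [pvCheck]
  | cons p ps ih =>
    intro hpw hge
    have hp2 : 2 ≤ p := hge p (by simp)
    obtain ⟨hplt, hpw'⟩ := List.pairwise_cons.mp hpw
    simp only [pvCheck]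
    by_cases hlt : i < p * p
    · rw [if_pos hlt]
      constructor
      · intro _ q hq hqq
        rcases List.mem_cons.mp hq with rfl | hq'
        · exact absurd hqq (by omega)
        · have hqp : p < q := hplt q hq'
          exact absurd hqq (by nlinarith)
      · intro _; trivial
    · rw [if_neg hlt]
      by_cases hmod : PySem.Int.mod i p = 0
      · rw [if_pos hmod]
        constructor
        · intro h; exact absurd h (by simp)
        · intro hall
          exact absurd ((PySem.Int.mod_eq_zero_iff_dvd i p).mp hmod)
            (hall p (by simp) (by omega))
      · rw [if_neg hmod,
          ih hpw' (fun q hq => hge q (List.mem_cons_of_mem _ hq))]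
        constructor
        · intro hall q hq hqq
          rcases List.mem_cons.mp hq with rfl | hq'
          · exact fun hdvd => hmod ((PySem.Int.mod_eq_zero_iff_dvd i q).mpr hdvd)
          · exact hall q hq' hqq
        · intro hall q hq hqq
          exact hall q (List.mem_cons_of_mem _ hq) hqq

-- every divisor e ≥ 2 of i sits above some divisor q of i that pvPB accepts
lemma pvLeast (i : Int) : ∀ (m : Nat) (e : Int), e.toNat ≤ m → 2 ≤ e → e ∣ i →
    ∃ q, 2 ≤ q ∧ q ≤ e ∧ q ∣ i ∧ pvPB q = true := by
  intro m
  induction m with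
  | zero => intro e hm h2 _; exact absurd hm (by omega)
  | succ m ih =>
    intro e hm h2 hdvd
    by_cases hq : pvPB e = true
    · exact ⟨e, h2, le_rfl, hdvd, hq⟩
    · unfold pvPB at hq
      rw [decide_eq_true_iff] at hq
      have h' : ¬ ∀ d ∈ PySem.List.pyRange 2 e 1, ¬(d ∣ e ∧ d * d ≤ e) :=
        fun hh => hq ⟨h2, hh⟩
      push Not at h'
      obtain ⟨d, hdm, hde, -⟩ := h'
      rw [PySem.List.mem_pyRange_one] at hdm
      obtain ⟨q, hq2, hqd, hqi, hqPB⟩ := ih d (by omega) hdm.1 (hde.trans hdvd)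
      exact ⟨q, hq2, by omega, hqi, hqPB⟩

lemma pvIsp_eq (i : Int) (h1 : 1 ≤ i) :
    (decide (2 ≤ i) && pvCheck i (pvPrimes (i - 1))) = pvPB i := by
  rcases (by omega : i = 1 ∨ 2 ≤ i) with rfl | hi2
  · simp [pvPB]
  · rw [decide_eq_true hi2, Bool.true_and]
    have hpr : pvPrimes (i - 1) = (PySem.List.pyRange 2 i 1).filter (fun x => pvPB x) := by
      unfold pvPrimes; rw [show i - 1 + 1 = i by ring]
    have hpw : (pvPrimes (i - 1)).Pairwise (· < ·) := by
      rw [hpr]; exact (PySem.List.pairwise_lt_pyRange_one 2 i).filter _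
    have hge : ∀ p ∈ pvPrimes (i - 1), 2 ≤ p := by
      intro p hp
      rw [hpr, List.mem_filter, PySem.List.mem_pyRange_one] at hp
      omega
    rw [Bool.eq_iff_iff, pvCheck_eq i _ hpw hge]
    unfold pvPB
    rw [decide_eq_true_iff]
    constructor
    · intro hall
      refine ⟨hi2, ?_⟩
      intro e he
      rw [PySem.List.mem_pyRange_one] at he
      rintro ⟨hei, hee⟩
      obtain ⟨q, hq2, hqe, hqi, hqPB⟩ := pvLeast i e.toNat e le_rfl he.1 hei
      refine absurd hqi (hall q ?_ ?_)
      · rw [hpr, List.mem_filter, PySem.List.mem_pyRange_one]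
        exact ⟨by omega, hqPB⟩
      · calc q * q ≤ e * e := mul_le_mul hqe hqe (by omega) (by omega)
          _ ≤ i := hee
    · rintro ⟨-, hall⟩ p hp hpp hdvd
      rw [hpr, List.mem_filter, PySem.List.mem_pyRange_one] at hp
      exact hall p (by rw [PySem.List.mem_pyRange_one]; omega) ⟨hdvd, hpp⟩

lemma pvPrimes_succ (k : Int) (hk : 1 ≤ k) :
    pvPrimes k = pvPrimes (k - 1) ++ (if pvPB k then [k] else []) := by
  rcases (by omega : k = 1 ∨ 2 ≤ k) with rfl | hk2
  · have hp1 : pvPB 1 = false := by decide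
    unfold pvPrimes
    rw [PySem.List.pyRange_one_eq_nil (by omega), PySem.List.pyRange_one_eq_nil (by omega)]
    simp [hp1]
  · unfold pvPrimes
    rw [show k - 1 + 1 = k by ring,
      PySem.List.pyRange_one_succ_right (show (2 : Int) ≤ k from hk2), List.filter_append]
    congr 1
    by_cases h : pvPB k <;> simp [h]

lemma pvBinv (b : Int) (m : Nat) : ∀ (k : Int) (acc : List Int × Int), 1 ≤ k → b = k + m →
    (PySem.List.pyRange k b 1).foldl
        (fun (st : (List Int × Int) × List Int) i =>
          let isp := decide (2 ≤ i) && pvCheck i st.2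
          let primes := if isp then st.2 ++ [i] else st.2
          let prev := if isp then st.1.2 + i else st.1.2
          ((st.1.1 ++ [prev], prev), primes))
        (acc, pvPrimes (k - 1))
      = ((PySem.List.pyRange k b 1).foldl pvStepPB acc, pvPrimes (b - 1)) := by
  induction m with
  | zero =>
    intro k acc hk hkb
    rw [PySem.List.pyRange_one_eq_nil (by omega), List.foldl_nil, List.foldl_nil,
      show k = b by omega]
  | succ m ih =>
    intro k acc hk hkb
    rw [PySem.List.pyRange_one_cons (by omega : k < b), List.foldl_cons, List.foldl_cons]
    have hstep :
        (let isp := decide (2 ≤ k) && pvCheck k (pvPrimes (k - 1))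
         let primes := if isp then pvPrimes (k - 1) ++ [k] else pvPrimes (k - 1)
         let prev := if isp then acc.2 + k else acc.2
         ((acc.1 ++ [prev], prev), primes)) = (pvStepPB acc k, pvPrimes k) := by
      simp only [pvIsp_eq k hk, pvStepPB]
      rw [pvPrimes_succ k hk]
      by_cases h : pvPB k <;> simp [h]
    rw [hstep, show pvPrimes k = pvPrimes ((k + 1) - 1) by ring_nf]
    exact ih (k + 1) (pvStepPB acc k) (by omega) (by omega)

lemma pvMain (n : Int) (hpre : 1 ≤ n) : primeSums n = primeSums_alt n := by
  show (List.foldl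
      (fun (st : List Int × Int) i =>
        let prev := if PySem.List.pyGetD
            (List.foldl
              (fun sv i =>
                if PySem.List.pyGetD sv i false = true then
                  List.foldl (fun sv2 j => PySem.List.pySetD sv2 j false) sv
                    (PySem.List.pyRange (i * 2) (n + 1) i)
                else sv)
              (PySem.List.pySetD
                (PySem.List.pySetD ((PySem.List.pyRange 0 (n + 1) 1).map (fun _ => true)) 0 false)
                1 false)
              (PySem.List.pyRange 2 (n + 1) 1))
            i false = true then st.2 + i else st.2
        (st.1 ++ [prev], prev))
      ([0], 0) (PySem.List.pyRange 1 (n + 1) 1)).1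
    = (((PySem.List.pyRange 1 (n + 1) 1).foldl
      (fun (st : (List Int × Int) × List Int) i =>
        let isp := decide (2 ≤ i) && pvCheck i st.2
        let primes := if isp then st.2 ++ [i] else st.2
        let prev := if isp then st.1.2 + i else st.1.2
        ((st.1.1 ++ [prev], prev), primes))
      (([0], 0), [])).1).1
  have hb : n + 1 = (((n + 1).toNat : Nat) : Int) := by omega
  set N := (n + 1).toNat with hN
  have h1 : (PySem.List.pyRange 0 (n + 1) 1).map (fun _ => (true : Bool))
      = pvS N (fun _ => true) := by
    have htn : (n + 1 - 0).toNat = N := by omega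
    rw [PySem.List.pyRange_one, List.map_map, htn]
    rfl
  have h2 : PySem.List.pySetD (PySem.List.pySetD (pvS N (fun _ => true)) 0 false) 1 false
      = pvS N (pvF 2) := by
    rw [pvS_set (by omega), pvS_set (by omega)]
    apply pvS_congr
    intro x hx0 hxN
    unfold pvF
    rw [PySem.List.pyRange_one_eq_nil le_rfl]
    simp only [List.not_mem_nil, false_implies, implies_true, and_true]
    rcases (by omega : x = 0 ∨ x = 1 ∨ 2 ≤ x) with rfl | rfl | hx
    · simp
    · simp
    · simp [show ¬(x = 1) by omega, show ¬(x = 0) by omega, hx]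
  have h3 := pvOuter N (n + 1) hb (n - 1).toNat 2 (by omega) (by omega)
  rw [h1, h2, h3]
  have h0 : pvPrimes (1 - 1) = ([] : List Int) := by
    unfold pvPrimes
    rw [PySem.List.pyRange_one_eq_nil (by omega)]
    rfl
  rw [show (([(0 : Int)], (0 : Int)), ([] : List Int)) = (([(0 : Int)], (0 : Int)), pvPrimes (1 - 1)) by rw [h0]]
  rw [pvBinv (n + 1) n.toNat 1 ([0], 0) (by omega) (by omega)]
  refine congrArg Prod.fst (PySem.List.foldl_congr_mem _ _ _ _ ?_)
  intro acc i hi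
  rw [PySem.List.mem_pyRange_one] at hi
  simp only [pvStepPB]
  rw [pvS_get (by omega) (by omega), pvF_eq_pvPB (n + 1) i (by omega) (by omega)]

-- ===== VERDICT (by name: the statement is the Claim_ definition above) =====
theorem primeSums_spec : Claim_equal_primeSums := by
  intro n _ hpre
  unfold Spec_primeSums
  exact pvMain n hpre

theorem primeSums_raises : Claim_raises_primeSums := by
  unfold Claim_raises_primeSums
  constructor
  · intro n _ hr hp
    exact absurd hp (by unfold Pre_primeSums Raises_primeSums at *; omega)
  · exact ⟨by decide, by decide, by decide⟩

-- self-check: the raise-witness value of B, extracted from primeSums_raises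
theorem primeSums_raises_witness_ok :
    primeSums_alt pvRaiseWitness_primeSums = pvRaiseWitnessOut_primeSums :=
  primeSums_raises.2.2.2
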